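-- pv_equiv track=rewrite | github.com/miliar/Code_Jam_Webscraper | solutions_python/Problem_75/649.py | result
-- ===== SOURCE A (Python) =====
-- def fpr(l):
--     s = '['
--     for k in range(len(l)):
--         e = l[k]
--         if k < len(l)-1:
--             s += e+', '
--         else:
--             s += e
--     s += ']'
--
--     return s
--
-- def result(comb,opp,invok):
--     el_list = []
--     while invok != []:
--         cur = invok[0]
--         invok = invok[1:]
--         if el_list != []:
--             if el_list[-1]+cur in comb:
--                 el_list[-1] = comb[el_list[-1]+cur]
--                 continue
--             else:
--                 fl = False
--                 for e in el_list:
--                     if e+cur in opp: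
--                         el_list = []
--                         fl = True
--                         break
--                 if not fl:
--                     el_list.append(cur)
--         else:
--             el_list.append(cur)
--
--     return fpr(el_list)
-- ===== SOURCE B (Python) =====
-- def result(comb, opp, invok):
--     stack = []
--     counts = {}  # multiset of elements currently on the stack
--     for cur in invok:
--         if not stack:
--             stack.append(cur)
--             counts[cur] = counts.get(cur, 0) + 1
--             continue
--         key = stack[-1] + cur
--         if key in comb:
--             old = stack[-1]
--             new = comb[key]
--             counts[old] = counts.get(old, 0) - 1
--             counts[new] = counts.get(new, 0) + 1
--             stack[-1] = new
--         elif any(o.endswith(cur) and counts.get(o[:len(o) - len(cur)], 0) > 0 for o in opp):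
--             stack = []
--             counts = {}
--         else:
--             stack.append(cur)
--             counts[cur] = counts.get(cur, 0) + 1
--     return '[' + ', '.join(stack) + ']'
-- ===== Notes on version B (the rewrite author's own statement) =====
-- stated objective: faster
-- what changed: B maintains a dict-based multiset of the elements currently on the stack, so the opposition test becomes one scan of the fixed opposed-pair set with O(1) counter lookups instead of A's rescan of the whole element stack, B iterates with a for loop instead of A's list-reslicing while loop, and formats with ', '.join instead of an index loop.
import Mathlib
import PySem

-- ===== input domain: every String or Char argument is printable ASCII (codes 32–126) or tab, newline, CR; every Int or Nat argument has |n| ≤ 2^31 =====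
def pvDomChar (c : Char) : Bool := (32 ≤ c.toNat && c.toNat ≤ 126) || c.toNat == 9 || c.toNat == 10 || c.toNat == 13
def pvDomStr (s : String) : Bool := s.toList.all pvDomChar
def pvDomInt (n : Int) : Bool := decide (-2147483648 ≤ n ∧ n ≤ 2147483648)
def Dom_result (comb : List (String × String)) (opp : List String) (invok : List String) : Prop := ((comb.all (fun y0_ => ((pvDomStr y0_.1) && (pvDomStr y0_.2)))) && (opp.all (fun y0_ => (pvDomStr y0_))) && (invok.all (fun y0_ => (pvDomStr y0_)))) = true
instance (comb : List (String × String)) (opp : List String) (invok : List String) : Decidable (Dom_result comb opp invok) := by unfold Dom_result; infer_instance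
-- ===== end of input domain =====

-- B replaces A's O(|stack|) opposition scan by a stack-multiset counter consulted once per opposing pair,
-- and formats with join instead of an index loop (objective: faster on long invocation lists).


-- ===== PORT A =====
-- fpr: 's = "["; for k in range(len(l)): e = l[k]; if k < len(l)-1: s += e+", " else: s += e; s += "]"'
def fpr (l : List String) : String :=
  ((PySem.List.pyRange 0 (PySem.List.len l) 1).foldl
    (fun s k =>
      if k < PySem.List.len l - 1 then s ++ PySem.List.pyGetD l k "" ++ ", "
      else s ++ PySem.List.pyGetD l k "") "[") ++ "]"

-- the 'while invok != []' loop of A, recursing on invok with el_list as state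
def resultGo (comb : PySem.Dict String String) (opp : List String) :
    List String → List String → List String
  | el, [] => el
  | el, cur :: rest =>
    if el ≠ [] then
      -- 'if el_list[-1]+cur in comb: el_list[-1] = comb[el_list[-1]+cur]'
      match comb.get? (PySem.List.pyGetD el (-1) "" ++ cur) with
      | some v => resultGo comb opp (el.dropLast ++ [v]) rest
      | none =>
        -- 'for e in el_list: if e+cur in opp: el_list = []; fl = True; break'
        if el.any (fun e => opp.contains (e ++ cur)) then
          resultGo comb opp [] rest
        else
          resultGo comb opp (el ++ [cur]) rest
    else
      resultGo comb opp (el ++ [cur]) rest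

def result (comb : List (String × String)) (opp : List String) (invok : List String) : String :=
  fpr (resultGo (PySem.Dict.ofList comb) opp [] invok)

-- ===== PORT B =====
-- B's loop: stack plus a counter 'cnt' of the elements currently on the stack; the opposition test
-- scans opp, asking for each pair string o whether o = e + cur for some stacked e via the counter.
def resultAltGo (comb : PySem.Dict String String) (opp : List String) :
    List String → List String → PySem.Dict String Int → List String
  | [], stack, _ => stack
  | cur :: rest, stack, cnt =>
    if stack = [] then
      resultAltGo comb opp rest (stack ++ [cur]) (cnt.modify cur 0 (· + 1))
    else
      match comb.get? (PySem.List.pyGetD stack (-1) "" ++ cur) with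
      | some v =>
        let old := PySem.List.pyGetD stack (-1) ""
        resultAltGo comb opp rest (stack.dropLast ++ [v])
          ((cnt.modify old 0 (· - 1)).modify v 0 (· + 1))
      | none =>
        if opp.any (fun o =>
            PySem.Str.endswith o cur &&
            decide ((0:Int) < cnt.getD (PySem.Str.slice o none (some (PySem.Str.len o - PySem.Str.len cur))) 0)) then
          resultAltGo comb opp rest [] PySem.Dict.empty
        else
          resultAltGo comb opp rest (stack ++ [cur]) (cnt.modify cur 0 (· + 1))

def result_alt (comb : List (String × String)) (opp : List String) (invok : List String) : String :=
  "[" ++ PySem.Str.join ", " (resultAltGo (PySem.Dict.ofList comb) opp invok [] PySem.Dict.empty) ++ "]"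

-- ===== PRECONDITION & SPEC =====
def Spec_result (comb : List (String × String)) (opp : List String) (invok : List String) (out : String) : Prop := out = result_alt comb opp invok
instance (comb : List (String × String)) (opp : List String) (invok : List String) (out : String) : Decidable (Spec_result comb opp invok out) := by unfold Spec_result; infer_instance

-- ===== CLAIM (what is proved, stated in full; the proofs are below) =====
def Claim_equal_result : Prop := ∀ (comb : List (String × String)) (opp : List String) (invok : List String), Dom_result comb opp invok → Spec_result comb opp invok (result comb opp invok)

-- ===== LEMMAS AND PROOFS =====

-- string facts specific to the two programs

theorem join_nil_str : PySem.Str.join ", " [] = "" := by decide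

theorem join_singleton_str (x : String) : PySem.Str.join ", " [x] = x := by
  apply String.toList_inj.mp
  simp [PySem.Str.toList_join, PySem.Chars.join_singleton]

theorem join_cons₂ (x y : String) (l : List String) :
    PySem.Str.join ", " (x :: y :: l) = x ++ ", " ++ PySem.Str.join ", " (y :: l) := by
  apply String.toList_inj.mp
  simp [PySem.Str.toList_join, PySem.Chars.join_cons_cons]

-- 'e + cur == o' characterised by B's endswith/prefix-slice test
theorem append_eq_iff (o e cur : String) :
    e ++ cur = o ↔ (PySem.Str.endswith o cur = true ∧
      PySem.Str.slice o none (some (PySem.Str.len o - PySem.Str.len cur)) = e) := by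
  constructor
  · rintro rfl
    constructor
    · rw [PySem.Str.endswith_eq, PySem.Chars.endswith_iff, String.toList_append]
      exact ⟨e.toList, rfl⟩
    · apply String.toList_inj.mp
      rw [PySem.Str.toList_slice, PySem.Chars.slice_eq_listSlice]
      have hlen : PySem.Str.len (e ++ cur) - PySem.Str.len cur = ((e.toList.length : Nat) : Int) := by
        simp [PySem.Str.len_eq, String.toList_append]
      rw [hlen, PySem.List.slice_to_natCast, String.toList_append, List.take_left]
  · rintro ⟨hend, rfl⟩
    rw [PySem.Str.endswith_eq, PySem.Chars.endswith_iff] at hend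
    obtain ⟨pre, hp⟩ := hend
    apply String.toList_inj.mp
    rw [String.toList_append, PySem.Str.toList_slice, PySem.Chars.slice_eq_listSlice]
    have hlen : PySem.Str.len o - PySem.Str.len cur = ((pre.length : Nat) : Int) := by
      have := congrArg List.length hp
      simp [PySem.Str.len_eq, ← hp]
    rw [hlen, PySem.List.slice_to_natCast, ← hp, List.take_left]

-- B's counter-based opposition test equals A's stack scan, given the counter invariant
theorem oppose_eq (opp : List String) (cur : String) (stack : List String)
    (cnt : PySem.Dict String Int)
    (hInv : ∀ e, cnt.getD e 0 = (stack.count e : Int)) :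
    (opp.any (fun o =>
        PySem.Str.endswith o cur &&
        decide ((0:Int) < cnt.getD (PySem.Str.slice o none (some (PySem.Str.len o - PySem.Str.len cur))) 0)))
      = stack.any (fun e => opp.contains (e ++ cur)) := by
  rw [Bool.eq_iff_iff]
  simp only [List.any_eq_true, Bool.and_eq_true, decide_eq_true_eq, List.contains_iff_mem]
  constructor
  · rintro ⟨o, ho, hend, hpos⟩
    set e := PySem.Str.slice o none (some (PySem.Str.len o - PySem.Str.len cur)) with he
    have heo : e ++ cur = o := (append_eq_iff o e cur).mpr ⟨hend, rfl⟩
    have hmem : e ∈ stack := by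
      rw [hInv e] at hpos
      exact List.count_pos_iff.mp (by exact_mod_cast hpos)
    exact ⟨e, hmem, heo ▸ ho⟩
  · rintro ⟨e, he, hmem⟩
    obtain ⟨hend, hsl⟩ := (append_eq_iff (e ++ cur) e cur).mp rfl
    refine ⟨e ++ cur, hmem, hend, ?_⟩
    rw [hsl, hInv e]
    exact_mod_cast List.count_pos_iff.mpr he

-- counter invariant through the three stack updates
theorem inv_append (stack : List String) (cnt : PySem.Dict String Int) (cur : String)
    (hInv : ∀ e, cnt.getD e 0 = (stack.count e : Int)) :
    ∀ e, (cnt.modify cur 0 (· + 1)).getD e 0 = (((stack ++ [cur]).count e : Nat) : Int) := by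
  intro e
  rw [PySem.Dict.getD_modify]
  split_ifs with h
  · subst h
    rw [hInv e]
    simp only [List.count_append, List.count_cons, List.count_nil, beq_self_eq_true, if_true]
    push_cast
    omega
  · rw [hInv e]
    congr 1
    simp [List.count_append, List.count_eq_zero, h]

theorem count_append_singleton (l : List String) (a e : String) :
    (((l ++ [a]).count e : Nat) : Int) = (l.count e : Int) + (if e = a then 1 else 0) := by
  by_cases h : e = a <;> simp [List.count_append, List.count_eq_zero, h]

theorem inv_combine (dl : List String) (g v : String) (cnt : PySem.Dict String Int)
    (hInv : ∀ e, cnt.getD e 0 = ((dl ++ [g]).count e : Int)) :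
    ∀ e, ((cnt.modify g 0 (· - 1)).modify v 0 (· + 1)).getD e 0
        = (((dl ++ [v]).count e : Nat) : Int) := by
  intro e
  simp only [PySem.Dict.getD_modify]
  rw [count_append_singleton]
  have h1 := (hInv e).trans (count_append_singleton dl g e)
  by_cases hv : e = v
  · subst hv
    by_cases hg : e = g
    · subst hg
      simp at h1 ⊢
      try omega
    · simp [hg] at h1 ⊢
      try omega
  · by_cases hg : e = g
    · subst hg
      simp [hv] at h1 ⊢
      try omega
    · simp [hv, hg] at h1 ⊢
      try omega

-- the two loops agree whenever the counter counts the stack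
theorem go_eq (comb : PySem.Dict String String) (opp : List String) :
    ∀ (invok stack : List String) (cnt : PySem.Dict String Int),
      (∀ e, cnt.getD e 0 = (stack.count e : Int)) →
      resultAltGo comb opp invok stack cnt = resultGo comb opp stack invok := by
  intro invok
  induction invok with
  | nil => intro stack cnt _; rw [resultAltGo, resultGo]
  | cons cur rest ih =>
    intro stack cnt hInv
    rw [resultAltGo, resultGo]
    by_cases hs : stack = []
    · rw [if_pos hs, if_neg (by simpa using hs)]
      exact ih _ _ (inv_append stack cnt cur hInv)
    · rw [if_neg hs, if_pos hs]
      cases hkey : comb.get? (PySem.List.pyGetD stack (-1) "" ++ cur) with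
      | some v =>
        have hgl : PySem.List.pyGetD stack (-1) "" = stack.getLast hs :=
          PySem.List.pyGetD_neg_one stack "" hs
        rw [hgl]
        have hInv' : ∀ e, cnt.getD e 0 = ((stack.dropLast ++ [stack.getLast hs]).count e : Int) :=
          fun e => (hInv e).trans (by rw [List.dropLast_append_getLast hs])
        exact ih _ _ (inv_combine stack.dropLast (stack.getLast hs) v cnt hInv')
      | none =>
        rw [oppose_eq opp cur stack cnt hInv]
        by_cases hop : stack.any (fun e => opp.contains (e ++ cur)) = true
        · rw [if_pos hop, if_pos hop]
          exact ih _ _ (fun e => by simp [PySem.Dict.getD_empty])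
        · rw [if_neg hop, if_neg hop]
          exact ih _ _ (inv_append stack cnt cur hInv)

-- fpr's index loop over a tail of l, against join
theorem fpr_go (l : List String) :
    ∀ (n j : Nat) (s : String), j + n = l.length →
      (List.range' j n).foldl
        (fun (s : String) (k : Nat) => if (k : Int) < (l.length : Int) - 1
          then s ++ l.getD k "" ++ ", " else s ++ l.getD k "") s
        = s ++ PySem.Str.join ", " (l.drop j) := by
  intro n
  induction n with
  | zero =>
    intro j s hj
    rw [List.range'_zero, List.foldl_nil, List.drop_of_length_le (by omega), join_nil_str,
      String.append_empty]
  | succ n ihn =>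
    intro j s hj
    have hjlt : j < l.length := by omega
    rw [List.range'_succ, List.foldl_cons, ihn (j+1) _ (by omega),
      List.drop_eq_getElem_cons hjlt, List.getD_eq_getElem l "" hjlt]
    cases n with
    | zero =>
      have hlast : ¬ ((j : Int) < (l.length : Int) - 1) := by omega
      rw [if_neg hlast, List.drop_of_length_le (by omega), join_nil_str, String.append_empty,
        join_singleton_str]
    | succ m =>
      have hmid : (j : Int) < (l.length : Int) - 1 := by omega
      have hj1 : j + 1 < l.length := by omega
      rw [if_pos hmid, List.drop_eq_getElem_cons hj1, join_cons₂]
      simp [String.append_assoc]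

theorem fpr_spec (l : List String) : fpr l = "[" ++ PySem.Str.join ", " l ++ "]" := by
  unfold fpr
  simp only [PySem.List.len_eq, PySem.List.pyRange_zero_nat, List.foldl_map,
    PySem.List.pyGetD_natCast]
  rw [List.range_eq_range']
  rw [fpr_go l l.length 0 "[" (by omega), List.drop_zero]

-- ===== VERDICT (by name: the statement is the Claim_ definition above) =====
theorem result_spec : Claim_equal_result := by
  intro comb opp invok _
  unfold Spec_result result result_alt
  rw [← go_eq (PySem.Dict.ofList comb) opp invok [] PySem.Dict.empty
        (fun e => by simp [PySem.Dict.getD_empty]),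
      fpr_spec]
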